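-- pv_equiv track=rewrite | github.com/T9404/EGE | Python/ЕГЭ2021;2022/17/Решение заданий. Поляков/4306.py | func
-- ===== SOURCE A (Python) =====
-- def func(d):
--     for i in d:
--         if (i % 3 != 0):
--             return False
--
--     for i in d:
--         if (i % 12 == 0):
--             return True
--
--     return False
-- ===== SOURCE B (Python) =====
-- def func(d):
--     found = False
--     for i in d:
--         if i % 3 != 0:
--             return False
--         if i % 12 == 0:
--             found = True
--     return found
-- ===== Notes on version B (the rewrite author's own statement) =====
-- stated objective: simpler
-- what changed: Fuses A's two sequential scans into a single pass that returns False on any element not divisible by 3 and tracks a 'found' flag for divisibility by 12.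
import Mathlib
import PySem

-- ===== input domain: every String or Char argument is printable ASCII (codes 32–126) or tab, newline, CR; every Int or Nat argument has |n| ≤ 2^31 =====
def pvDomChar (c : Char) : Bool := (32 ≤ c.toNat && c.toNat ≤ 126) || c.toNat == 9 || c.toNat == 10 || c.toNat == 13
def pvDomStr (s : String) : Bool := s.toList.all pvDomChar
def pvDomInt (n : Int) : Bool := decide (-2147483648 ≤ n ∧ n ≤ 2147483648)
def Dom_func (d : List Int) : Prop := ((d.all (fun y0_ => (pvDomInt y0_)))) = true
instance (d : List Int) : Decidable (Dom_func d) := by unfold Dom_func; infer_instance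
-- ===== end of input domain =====

-- B fuses A's two sequential scans into one pass carrying a 'found' flag; same values everywhere.

-- ===== PORT A =====
-- first loop: returns false as soon as some i % 3 != 0, else true (loop fell through)
def funcLoop3 : List Int → Bool
  | [] => true
  | i :: t => if PySem.Int.mod i 3 ≠ 0 then false else funcLoop3 t

-- second loop: returns true as soon as some i % 12 == 0, else false
def funcLoop12 : List Int → Bool
  | [] => false
  | i :: t => if PySem.Int.mod i 12 = 0 then true else funcLoop12 t

def func (d : List Int) : Bool :=
  if funcLoop3 d then funcLoop12 d else false

-- ===== PORT B =====
def funcAltGo : List Int → Bool → Bool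
  | [], found => found
  | i :: t, found =>
      if PySem.Int.mod i 3 ≠ 0 then false
      else funcAltGo t (found || decide (PySem.Int.mod i 12 = 0))

def func_alt (d : List Int) : Bool := funcAltGo d false

-- ===== PRECONDITION & SPEC =====
def Spec_func (d : List Int) (out : Bool) : Prop := out = func_alt d
instance (d : List Int) (out : Bool) : Decidable (Spec_func d out) := by unfold Spec_func; infer_instance

-- ===== CLAIM (what is proved, stated in full; the proofs are below) =====
def Claim_equal_func : Prop := ∀ (d : List Int), Dom_func d → Spec_func d (func d)

-- ===== LEMMAS AND PROOFS =====
theorem funcAltGo_eq (d : List Int) : ∀ f : Bool,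
    funcAltGo d f = if funcLoop3 d then (f || funcLoop12 d) else false := by
  induction d with
  | nil => intro f; simp [funcAltGo, funcLoop3, funcLoop12]
  | cons i t ih =>
    intro f
    by_cases h : PySem.Int.mod i 3 ≠ 0
    · simp at h
      simp [funcAltGo, funcLoop3, h]
    · simp at h
      by_cases h12 : PySem.Int.mod i 12 = 0 <;>
        simp [funcAltGo, funcLoop3, funcLoop12, h, h12, ih, Bool.or_assoc, Bool.and_assoc]

-- ===== VERDICT =====
theorem func_spec : Claim_equal_func := by
  intro d _
  unfold Spec_func func func_alt
  rw [funcAltGo_eq]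
  simp
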